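-- pv_equiv track=rewrite | github.com/pedroalbanese/edgetk | cmd/edgetk-compat.py | parse_encrypted_pem
-- ===== SOURCE A (Python) =====
-- def parse_encrypted_pem(pem_content):
--     """Parse an encrypted PEM file with BEGIN/END PRIVATE KEY"""
--     lines = pem_content.strip().split('\n')
--     headers = {}
--     data_lines = []
--     in_headers = False
--     in_data = False
--
--     for line in lines:
--         if line.startswith('-----BEGIN PRIVATE KEY-----'):
--             in_headers = True
--             continue
--         elif line.startswith('-----END PRIVATE KEY-----'):
--             break
--         elif in_headers and ':' in line:
--             key, value = line.split(':', 1)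
--             headers[key.strip()] = value.strip()
--         elif line == '' and in_headers:
--             # Empty line marks end of headers, start of data
--             in_headers = False
--             in_data = True
--         elif in_data:
--             data_lines.append(line.strip())
--
--     return headers, ''.join(data_lines)
-- ===== SOURCE B (Python) =====
-- BEGIN = '-----BEGIN PRIVATE KEY-----'
-- END = '-----END PRIVATE KEY-----'
--
--
-- def parse_encrypted_pem(pem_content):
--     """Parse an encrypted PEM file with BEGIN/END PRIVATE KEY"""
--     lines = pem_content.strip().split('\n')
--     body = []
--     for ln in lines:            # everything up to the first END marker
--         if ln.startswith(END):
--             break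
--         body.append(ln)
--     begin = next((i for i, ln in enumerate(body) if ln.startswith(BEGIN)), None)
--     if begin is None:
--         return {}, ''
--     region = body[begin + 1:]
--     try:
--         blank = region.index('')        # first blank line separates headers from data
--     except ValueError:
--         blank = len(region)             # no blank line: header lines only, no data
--     headers = {}
--     for ln in region[:blank]:
--         if ':' in ln:
--             key, value = ln.split(':', 1)
--             headers[key.strip()] = value.strip()
--     return headers, ''.join(ln.strip() for ln in region[blank + 1:])
-- ===== Notes on version B (the rewrite author's own statement) =====
-- stated objective: alternative
-- what changed: Replaces A's single four-flag state-machine loop by boundary location and slicing: truncate at the first END marker, find the first BEGIN marker, slice the region after it at its first blank line, read headers from the colon lines before the blank and data from the stripped lines after it. Pre_ excludes inputs whose block before the first END marker contains more than one BEGIN marker line: such a PEM is malformed and neither reading of the extra marker is specified, so either value is defensible.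
import Mathlib
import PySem

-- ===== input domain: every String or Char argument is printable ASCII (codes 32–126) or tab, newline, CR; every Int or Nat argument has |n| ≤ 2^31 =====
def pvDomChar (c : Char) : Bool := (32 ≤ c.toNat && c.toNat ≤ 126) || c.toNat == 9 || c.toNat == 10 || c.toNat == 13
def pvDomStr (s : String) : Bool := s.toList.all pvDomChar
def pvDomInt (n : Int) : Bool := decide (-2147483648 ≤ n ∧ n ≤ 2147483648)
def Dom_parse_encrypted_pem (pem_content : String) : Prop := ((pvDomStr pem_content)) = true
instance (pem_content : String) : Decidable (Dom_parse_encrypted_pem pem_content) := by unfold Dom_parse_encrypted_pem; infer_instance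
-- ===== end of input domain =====

-- B re-decomposes the parse by boundary location and slicing: truncate at the first END
-- marker, find the first BEGIN marker, slice the region after it at its first blank line;
-- headers are the colon lines before the blank, data the stripped lines after it
-- (objective: alternative decomposition, same cost).

def pvBEGIN : String := "-----BEGIN PRIVATE KEY-----"
def pvEND : String := "-----END PRIVATE KEY-----"

-- ===== PORT A =====
-- the for-loop of A; `break` = returning the state early; state = (headers, data_lines, in_headers, in_data)
def pvALoop : List String → PySem.Dict String String → List String → Bool → Bool →
    PySem.Dict String String × List String
  | [], headers, dataLines, _, _ => (headers, dataLines)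
  | line :: rest, headers, dataLines, inHeaders, inData =>
    if PySem.Str.startswith line pvBEGIN then
      pvALoop rest headers dataLines true inData
    else if PySem.Str.startswith line pvEND then
      (headers, dataLines)
    else if inHeaders && PySem.Str.isIn ":" line then
      -- key, value = line.split(':', 1): under the guard the split has exactly two parts
      let parts := (PySem.Str.splitMax? line ":" 1).getD []
      pvALoop rest
        (headers.insert (PySem.Str.strip (parts.getD 0 "")) (PySem.Str.strip (parts.getD 1 "")))
        dataLines inHeaders inData
    else if line == "" && inHeaders then
      pvALoop rest headers dataLines false true
    else if inData then
      pvALoop rest headers (dataLines ++ [PySem.Str.strip line]) inHeaders inData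
    else
      pvALoop rest headers dataLines inHeaders inData

def parse_encrypted_pem (pem_content : String) : (List (String × String)) × String :=
  let lines := (PySem.Str.split? (PySem.Str.strip pem_content) "\n").getD []   -- split('\n'): sep ≠ "" so split? is some
  let res := pvALoop lines PySem.Dict.empty [] false false
  (res.1.items, PySem.Str.join "" res.2)

-- ===== PORT B =====
-- body of Source B's header loop: record the line if it contains ':'
def pvHdrStep (headers : PySem.Dict String String) (line : String) : PySem.Dict String String :=
  if PySem.Str.isIn ":" line then
    let parts := (PySem.Str.splitMax? line ":" 1).getD []
    headers.insert (PySem.Str.strip (parts.getD 0 "")) (PySem.Str.strip (parts.getD 1 ""))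
  else headers

def parse_encrypted_pem_alt (pem_content : String) : (List (String × String)) × String :=
  let lines := (PySem.Str.split? (PySem.Str.strip pem_content) "\n").getD []   -- split('\n'): sep ≠ "" so split? is some
  -- the break-loop: everything up to the first END marker
  let body := List.takeWhile (fun l => !(PySem.Str.startswith l pvEND)) lines
  -- next((i for i, ln in enumerate(body) if ln.startswith(BEGIN)), None)
  match List.findIdx? (fun l => PySem.Str.startswith l pvBEGIN) body with
  | none => ([], "")
  | some i =>
    let region := body.drop (i + 1)
    -- region.index('') with the no-blank fallback len(region)
    let blank := (PySem.List.index? region "").getD region.length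
    let headers := (region.take blank).foldl pvHdrStep PySem.Dict.empty
    (headers.items, PySem.Str.join "" ((region.drop (blank + 1)).map PySem.Str.strip))

-- ===== PRECONDITION & SPEC =====
-- Pre_ excludes inputs whose block before the first END marker contains more than one BEGIN
-- marker line: such a PEM is malformed and no reading of the extra marker is specified, so
-- either value is defensible (A merges a second header section, B keeps the marker as data).
def Pre_parse_encrypted_pem (pem_content : String) : Prop :=
  (((PySem.Str.split? (PySem.Str.strip pem_content) "\n").getD []).takeWhile
      (fun l => !(PySem.Str.startswith l pvEND))).countP
    (fun l => PySem.Str.startswith l pvBEGIN) ≤ 1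
instance (pem_content : String) : Decidable (Pre_parse_encrypted_pem pem_content) := by unfold Pre_parse_encrypted_pem; infer_instance

def pvWitness_parse_encrypted_pem : String :=
  "-----BEGIN PRIVATE KEY-----\nDEK-Info: AES-256-CBC\n\ndGVzdA==\n-----END PRIVATE KEY-----"

def Spec_parse_encrypted_pem (pem_content : String) (out : (List (String × String)) × String) : Prop := out = parse_encrypted_pem_alt pem_content
instance (pem_content : String) (out : (List (String × String)) × String) : Decidable (Spec_parse_encrypted_pem pem_content out) := by unfold Spec_parse_encrypted_pem; infer_instance

-- ===== CLAIM (what is proved, stated in full; the proofs are below) =====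
def Claim_equal_parse_encrypted_pem : Prop := ∀ (pem_content : String), Dom_parse_encrypted_pem pem_content → Pre_parse_encrypted_pem pem_content → Spec_parse_encrypted_pem pem_content (parse_encrypted_pem pem_content)

-- ===== LEMMAS AND PROOFS =====

def pvNoEnd (ls : List String) : Prop := ∀ l ∈ ls, PySem.Str.startswith l pvEND = false
def pvNoBegin (ls : List String) : Prop := ∀ l ∈ ls, PySem.Str.startswith l pvBEGIN = false

lemma pv_isB_not_isE {l : String} (h : PySem.Str.startswith l pvBEGIN = true) :
    PySem.Str.startswith l pvEND = false := by
  rw [PySem.Str.startswith_eq, PySem.Chars.startswith_iff] at h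
  by_contra hne
  rw [Bool.not_eq_false, PySem.Str.startswith_eq, PySem.Chars.startswith_iff] at hne
  rcases List.prefix_or_prefix_of_prefix h hne with hp | hp
  · revert hp; decide
  · revert hp; decide

lemma pvALoop_beforeEnd (ls : List String) : ∀ h d ih idt,
    pvALoop ls h d ih idt =
      pvALoop (List.takeWhile (fun l => !(PySem.Str.startswith l pvEND)) ls) h d ih idt := by
  induction ls with
  | nil => intro h d ih idt; simp only [List.takeWhile]
  | cons l ls IH =>
    intro h d ih idt
    by_cases hB : PySem.Str.startswith l pvBEGIN = true
    · have hE := pv_isB_not_isE hB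
      simp only [pvALoop, hB, if_true, List.takeWhile, hE, Bool.not_false]
      exact IH _ _ _ _
    · simp only [Bool.not_eq_true] at hB
      by_cases hE : PySem.Str.startswith l pvEND = true
      · simp only [pvALoop, hB, hE, List.takeWhile, Bool.false_eq_true, if_false, Bool.not_true]
        simp
      · simp only [Bool.not_eq_true] at hE
        simp only [pvALoop, hB, hE, List.takeWhile, Bool.false_eq_true, if_false, Bool.not_false]
        split_ifs <;> apply IH

lemma pvALoop_start (ls : List String) : ∀ h d, pvNoEnd ls →
    pvALoop ls h d false false =
      (match List.dropWhile (fun l => !(PySem.Str.startswith l pvBEGIN)) ls with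
      | [] => (h, d)
      | _ :: region => pvALoop region h d true false) := by
  induction ls with
  | nil => intro h d _; simp only [pvALoop, List.dropWhile]
  | cons l ls IH =>
    intro h d hne
    have hE : PySem.Str.startswith l pvEND = false := hne l (by simp)
    by_cases hB : PySem.Str.startswith l pvBEGIN = true
    · simp only [pvALoop, hB, if_true, List.dropWhile, Bool.not_true]
    · simp only [Bool.not_eq_true] at hB
      simp only [pvALoop, hB, hE, List.dropWhile, Bool.false_eq_true, if_false, Bool.not_false,
        Bool.false_and, Bool.and_false]
      exact IH h d (fun x hx => hne x (by simp [hx]))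

lemma pvALoop_data (ls : List String) : ∀ h p, pvNoEnd ls → pvNoBegin ls →
    pvALoop ls h p false true = (h, p ++ ls.map PySem.Str.strip) := by
  induction ls with
  | nil => intro h p _ _; simp [pvALoop]
  | cons l ls IH =>
    intro h p hne hnb
    have hE : PySem.Str.startswith l pvEND = false := hne l (by simp)
    have hB : PySem.Str.startswith l pvBEGIN = false := hnb l (by simp)
    simp only [pvALoop, hB, hE, Bool.false_eq_true, if_false, Bool.false_and, Bool.and_false,
      if_true]
    rw [IH _ _ (fun x hx => hne x (by simp [hx])) (fun x hx => hnb x (by simp [hx]))]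
    simp

-- header phase of A = B's slice at the first blank line
lemma pvALoop_hdr (ls : List String) : ∀ h d, pvNoEnd ls → pvNoBegin ls →
    pvALoop ls h d true false =
      ((ls.take ((PySem.List.index? ls "").getD ls.length)).foldl pvHdrStep h,
       d ++ (ls.drop (((PySem.List.index? ls "").getD ls.length) + 1)).map PySem.Str.strip) := by
  induction ls with
  | nil => intro h d _ _; simp [pvALoop, PySem.List.index?]
  | cons l ls IH =>
    intro h d hne hnb
    have hE : PySem.Str.startswith l pvEND = false := hne l (by simp)
    have hB : PySem.Str.startswith l pvBEGIN = false := hnb l (by simp)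
    have hne' : pvNoEnd ls := fun x hx => hne x (by simp [hx])
    have hnb' : pvNoBegin ls := fun x hx => hnb x (by simp [hx])
    by_cases hbl : l = ""
    · subst hbl
      have hi : PySem.List.index? ("" :: ls) "" = some 0 := PySem.List.index?_cons_self "" ls
      have hcol : PySem.Str.isIn ":" "" = false := by decide
      simp only [pvALoop, hB, hE, Bool.false_eq_true, if_false, hcol, Bool.and_false, BEq.rfl,
        Bool.true_and, if_true, hi]
      rw [pvALoop_data ls h d hne' hnb']
      simp
    · have hi : PySem.List.index? (l :: ls) "" = (PySem.List.index? ls "").map (· + 1) :=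
        PySem.List.index?_cons_of_ne ls hbl
      have hstep : ∀ (h' : PySem.Dict String String),
          pvALoop (l :: ls) h' d true false = pvALoop ls (pvHdrStep h' l) d true false := by
        intro h'
        by_cases hC : PySem.Str.isIn ":" l = true
        · simp only [pvALoop, hB, hE, hC, Bool.false_eq_true, if_false, Bool.true_and, if_true,
            pvHdrStep]
        · simp only [Bool.not_eq_true] at hC
          have hbeq : (l == "") = false := beq_eq_false_iff_ne.mpr hbl
          simp only [pvALoop, hB, hE, hC, hbeq, Bool.false_eq_true, if_false, Bool.true_and,
            Bool.false_and, pvHdrStep]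
      rw [hstep h, IH (pvHdrStep h l) d hne' hnb', hi]
      rcases hix : PySem.List.index? ls "" with _ | i
      · simp only [Option.map_none, Option.getD_none, List.length_cons,
          List.take_succ_cons, List.drop_succ_cons, List.foldl_cons, List.take_length]
      · simp only [Option.map_some, Option.getD_some, List.take_succ_cons,
          List.drop_succ_cons, List.foldl_cons]

-- the first BEGIN index vs the dropWhile decomposition used on A's side
lemma pvFindIdx_none (ls : List String) (p : String → Bool)
    (h : List.dropWhile (fun l => !(p l)) ls = []) : List.findIdx? p ls = none := by
  rw [List.findIdx?_eq_none_iff]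
  intro x hx
  have := List.dropWhile_eq_nil_iff.mp h x hx
  simpa using this

lemma pvFindIdx_cons (ls : List String) (p : String → Bool) : ∀ b rest,
    List.dropWhile (fun l => !(p l)) ls = b :: rest →
    p b = true ∧ ∃ i, List.findIdx? p ls = some i ∧ ls.drop (i + 1) = rest := by
  induction ls with
  | nil => intro b rest h; simp [List.dropWhile] at h
  | cons l ls IH =>
    intro b rest h
    by_cases hp : p l = true
    · simp only [List.dropWhile, hp, Bool.not_true] at h
      simp only [List.cons.injEq] at h
      refine ⟨h.1 ▸ hp, 0, ?_, ?_⟩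
      · simp [List.findIdx?_cons, hp]
      · simp [h.2]
    · simp only [Bool.not_eq_true] at hp
      simp only [List.dropWhile, hp, Bool.not_false] at h
      obtain ⟨hb, i, hfi, hdr⟩ := IH b rest h
      exact ⟨hb, i + 1, by simp [List.findIdx?_cons, hp, hfi], by simpa using hdr⟩

theorem parse_encrypted_pem_main (s : String) (hpre : Pre_parse_encrypted_pem s) :
    parse_encrypted_pem s = parse_encrypted_pem_alt s := by
  unfold parse_encrypted_pem parse_encrypted_pem_alt
  unfold Pre_parse_encrypted_pem at hpre
  dsimp only
  rw [pvALoop_beforeEnd]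
  have hne1 : pvNoEnd (List.takeWhile (fun l => !(PySem.Str.startswith l pvEND))
      ((PySem.Str.split? (PySem.Str.strip s) "\n").getD [])) := by
    intro x hx
    have := List.mem_takeWhile_imp hx
    simpa using this
  generalize hG : List.takeWhile (fun l => !(PySem.Str.startswith l pvEND))
      ((PySem.Str.split? (PySem.Str.strip s) "\n").getD []) = body at hpre hne1 ⊢
  rw [pvALoop_start _ _ _ hne1]
  rcases hdw : List.dropWhile (fun l => !(PySem.Str.startswith l pvBEGIN)) body with _ | ⟨b, region⟩
  · rw [pvFindIdx_none body _ hdw]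
    rfl
  · obtain ⟨hbB', i, hfi, hdr⟩ := pvFindIdx_cons body _ b region hdw
    rw [hfi]
    have hner : pvNoEnd region := by
      intro x hx
      apply hne1
      have hmem : x ∈ b :: region := List.mem_cons_of_mem _ hx
      rw [← hdw] at hmem
      exact (List.dropWhile_sublist _).subset hmem
    have hbB : PySem.Str.startswith b pvBEGIN = true := hbB'
    have hnbr : pvNoBegin region := by
      have hsplit : body = body.takeWhile (fun l => !(PySem.Str.startswith l pvBEGIN)) ++
          (b :: region) := by rw [← hdw, List.takeWhile_append_dropWhile]
      have hcount : body.countP (fun l => PySem.Str.startswith l pvBEGIN) =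
          (body.takeWhile (fun l => !(PySem.Str.startswith l pvBEGIN))).countP
            (fun l => PySem.Str.startswith l pvBEGIN) +
          (1 + region.countP (fun l => PySem.Str.startswith l pvBEGIN)) := by
        conv_lhs => rw [hsplit]
        rw [List.countP_append, List.countP_cons]
        simp only [hbB, if_true]
        omega
      have hczero : region.countP (fun l => PySem.Str.startswith l pvBEGIN) = 0 := by omega
      intro x hx
      have := List.countP_eq_zero.mp hczero x hx
      simpa using this
    dsimp only
    rw [pvALoop_hdr region PySem.Dict.empty [] hner hnbr, hdr]
    simp

-- ===== VERDICT (by name: the statement is the Claim_ definition above) =====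
theorem parse_encrypted_pem_spec : Claim_equal_parse_encrypted_pem := by
  intro s _ hpre
  exact parse_encrypted_pem_main s hpre
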